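-- pv_equiv track=rewrite | github.com/mThanuj1825/DSA | Strings/Substrings and Subsequences/count_distinct_subsequences.py | solve
-- ===== SOURCE A (Python) =====
-- def solve(string: str) -> int:
--     dp = [0] * (len(string) + 1)
--     dp[0] = 1
--
--     mp = {}
--     idx = 1
--
--     while idx < len(dp):
--         dp[idx] = dp[idx - 1] * 2
--         c = string[idx - 1]
--
--         if c in mp:
--             dp[idx] -= dp[mp[c] - 1]
--         mp[c] = idx
--         idx += 1
--
--     return dp[-1]
-- ===== SOURCE B (Python) =====
-- def solve(string: str) -> int:
--     endings = {}
--     for c in string: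
--         endings[c] = 1 + sum(endings.values())
--     return 1 + sum(endings.values())
-- ===== Notes on version B (the rewrite author's own statement) =====
-- stated objective: alternative
-- what changed: Replaces A's doubling-with-subtraction dp table (dp[i] = 2*dp[i-1] - dp[last[c]-1]) by a different recurrence that counts distinct subsequences grouped by their last character: endings[c] = 1 + sum(endings.values()), answer = 1 + sum(endings.values()); no dp array, no subtraction, no index map.
import Mathlib
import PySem

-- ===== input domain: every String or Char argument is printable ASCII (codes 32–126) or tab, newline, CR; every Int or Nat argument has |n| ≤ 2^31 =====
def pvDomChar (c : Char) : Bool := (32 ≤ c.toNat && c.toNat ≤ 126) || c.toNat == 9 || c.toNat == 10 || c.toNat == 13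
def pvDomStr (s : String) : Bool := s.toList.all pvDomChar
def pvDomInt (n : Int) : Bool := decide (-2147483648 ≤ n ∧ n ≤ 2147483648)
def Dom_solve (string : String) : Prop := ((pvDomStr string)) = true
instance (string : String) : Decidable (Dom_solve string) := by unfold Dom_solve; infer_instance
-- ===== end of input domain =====

-- B counts distinct subsequences grouped by last character (end[c] = 1 + sum of all ending counts),
-- replacing A's doubling-with-subtraction dp table; same return value, no observable mutation.
-- ===== PORT A =====
-- one iteration of A's while loop, with idx the loop counter (an element of range(1, len(dp)))
def solveStepA (s : List Char) (st : List Int × PySem.Dict Char Int) (idx : Int) :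
    List Int × PySem.Dict Char Int :=
  let dp := st.1
  let mp := st.2
  let v0 := PySem.List.pyGetD dp (idx - 1) 0 * 2            -- dp[idx] = dp[idx-1] * 2
  let c := PySem.List.pyGetD s (idx - 1) ' '                -- c = string[idx-1]
  let v := if mp.contains c then v0 - PySem.List.pyGetD dp (mp.getD c 0 - 1) 0 else v0
  (PySem.List.pySetD dp idx v, mp.insert c idx)

def solve (string : String) : Int :=
  let s := string.toList
  let dp0 := (List.replicate (s.length + 1) (0 : Int)).set 0 1   -- dp = [0]*(len+1); dp[0] = 1
  let fin := (PySem.List.pyRange 1 ((s.length : Int) + 1) 1).foldl (solveStepA s)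
      (dp0, PySem.Dict.empty)                                    -- while idx < len(dp)
  PySem.List.pyGetD fin.1 (-1) 0                                 -- return dp[-1]

-- ===== PORT B =====
-- endings[c] = 1 + sum(endings.values())   (sum over dict values; order-independent)
def solveStepB (endings : PySem.Dict Char Int) (c : Char) : PySem.Dict Char Int :=
  endings.insert c (1 + endings.values.sum)

def solve_alt (string : String) : Int :=
  1 + (string.toList.foldl solveStepB PySem.Dict.empty).values.sum

-- ===== PRECONDITION & SPEC =====
def Spec_solve (string : String) (out : Int) : Prop := out = solve_alt string
instance (string : String) (out : Int) : Decidable (Spec_solve string out) := by unfold Spec_solve; infer_instance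

-- ===== CLAIM (what is proved, stated in full; the proofs are below) =====
def Claim_equal_solve : Prop := ∀ (string : String), Dom_solve string → Spec_solve string (solve string)

-- ===== LEMMAS AND PROOFS =====

-- replacing the single item keyed c in a key-nodup item list changes the value sum by (new - old)
theorem sum_map_replace (c : Char) (v v0 : Int) :
    ∀ (l : List (Char × Int)), (l.map (·.1)).Nodup → (c, v0) ∈ l →
    ((l.map (fun p => if p.1 == c then (c, v) else p)).map (fun p => p.2)).sum
      = (l.map (fun p => p.2)).sum - v0 + v := by
  intro l
  induction l with
  | nil => intro _ h; cases h
  | cons p t ih =>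
    intro hnd hm
    simp only [List.map_cons, List.nodup_cons, List.mem_map] at hnd
    obtain ⟨hnk, hndt⟩ := hnd
    rcases List.mem_cons.mp hm with hp | ht
    · -- head is the c-item; no tail item has key c
      subst hp
      have htail : t.map (fun p => if p.1 == c then (c, v) else p) = t := by
        conv_rhs => rw [← List.map_id t]
        apply List.map_congr_left
        intro q hq
        have hq1 : q.1 ≠ c := fun h => hnk ⟨q, hq, h⟩
        simp [hq1]
      simp only [List.map_cons, beq_self_eq_true, if_true, htail, List.sum_cons]
      ring
    · -- c-item is in the tail; head key ≠ c
      have hne : p.1 ≠ c := fun h => hnk ⟨(c, v0), ht, h.symm⟩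
      have hpe : (fun p : Char × Int => if p.1 == c then (c, v) else p) p = p := by
        simp [hne]
      simp only [List.map_cons, List.sum_cons, hpe]
      rw [ih hndt ht]
      ring

-- inserting into a dict with nodup keys changes the value sum by (v - old getD)
theorem sumValues_insert (d : PySem.Dict Char Int) (hnd : d.keys.Nodup) (c : Char) (v : Int) :
    (d.insert c v).values.sum = d.values.sum - d.getD c 0 + v := by
  by_cases hc : d.contains c = true
  · cases hg : d.get? c with
    | none =>
      rw [PySem.Dict.contains_eq_isSome_get?, hg] at hc; cases hc
    | some v0 =>
      have hmem : (c, v0) ∈ d.items := PySem.Dict.mem_items_of_get?_eq_some d hg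
      have hgd : d.getD c 0 = v0 := PySem.Dict.getD_of_get?_eq_some d 0 hg
      simp only [PySem.Dict.values, PySem.Dict.items_insert_of_contains d v hc, hgd]
      exact sum_map_replace c v v0 d.items hnd hmem
  · have hc' : d.contains c = false := by revert hc; cases d.contains c <;> simp
    rw [PySem.Dict.getD_of_not_contains d 0 hc']
    simp only [PySem.Dict.values, PySem.Dict.items_insert_of_not_contains d v hc',
      List.map_append, List.sum_append]
    simp

-- simulation invariant: after k characters, A's (dp, mp) and B's endings dict correspond
def SimInv (s : List Char) (k : Nat) (dp : List Int) (mp : PySem.Dict Char Int)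
    (endings : PySem.Dict Char Int) : Prop :=
  dp.length = s.length + 1 ∧
  dp.getD k 0 = 1 + endings.values.sum ∧
  endings.keys.Nodup ∧
  (∀ c, mp.get? c = none → endings.getD c 0 = 0) ∧
  (∀ c j, mp.get? c = some j → 1 ≤ j ∧ j ≤ (k : Int) ∧ dp.getD (j - 1).toNat 0 = endings.getD c 0)

theorem loop_sim (s : List Char) : ∀ (m k : Nat) (dp : List Int) (mp : PySem.Dict Char Int)
    (endings : PySem.Dict Char Int), m = s.length - k → k ≤ s.length →
    SimInv s k dp mp endings →
    PySem.List.pyGetD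
      (((PySem.List.pyRange ((k : Int) + 1) ((s.length : Int) + 1) 1).foldl (solveStepA s)
        (dp, mp)).1) (-1) 0
      = 1 + ((s.drop k).foldl solveStepB endings).values.sum := by
  intro m
  induction m with
  | zero =>
    intro k dp mp endings hm hk hinv
    obtain ⟨hlen, hget, -, -, -⟩ := hinv
    have hkn : k = s.length := by omega
    subst hkn
    rw [PySem.List.pyRange_one_eq_nil (by omega), List.drop_length]
    simp only [List.foldl_nil]
    have hne : dp ≠ [] := by intro h; simp [h] at hlen
    rw [PySem.List.pyGetD_neg_one dp 0 hne, List.getLast_eq_getElem hne,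
        ← List.getD_eq_getElem dp 0 (by omega), hlen]
    simpa using hget
  | succ m ih =>
    intro k dp mp endings hm hk hinv
    obtain ⟨hlen, hget, hnd, hnone, hsome⟩ := hinv
    have hkn : k < s.length := by omega
    rw [PySem.List.pyRange_one_cons (by omega), List.foldl_cons,
        List.drop_eq_getElem_cons hkn, List.foldl_cons]
    have hstep : solveStepA s (dp, mp) ((k : Int) + 1) =
        (dp.set (k + 1) (2 * (1 + endings.values.sum) - endings.getD s[k] 0),
         mp.insert s[k] ((k : Int) + 1)) := by
      unfold solveStepA
      have h1 : (k : Int) + 1 - 1 = ((k : Nat) : Int) := by ring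
      have hc : PySem.List.pyGetD s ((k : Int) + 1 - 1) ' ' = s[k] := by
        rw [h1, PySem.List.pyGetD_natCast, List.getD_eq_getElem s ' ' hkn]
      rw [hc]
      have hsetc : ∀ v : Int, PySem.List.pySetD dp ((k : Int) + 1) v = dp.set (k + 1) v := by
        intro v
        have h2 : (k : Int) + 1 = ((k + 1 : Nat) : Int) := by push_cast; ring
        rw [h2, PySem.List.pySetD_natCast]
      cases hg : mp.get? s[k] with
      | none =>
        have hcon : mp.contains s[k] = false := by
          rw [PySem.Dict.contains_eq_isSome_get?, hg]; rfl
        have hl0 : endings.getD s[k] 0 = 0 := hnone _ hg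
        simp only [hcon, Bool.false_eq_true, if_false, h1, PySem.List.pyGetD_natCast, hget, hsetc]
        rw [hl0]
        have hv : (1 + endings.values.sum) * 2 = 2 * (1 + endings.values.sum) - 0 := by ring
        rw [hv]
      | some j =>
        have hcon : mp.contains s[k] = true := by
          rw [PySem.Dict.contains_eq_isSome_get?, hg]; rfl
        obtain ⟨hj1, hjk, hjv⟩ := hsome _ _ hg
        have hgd : mp.getD s[k] 0 = j := PySem.Dict.getD_of_get?_eq_some mp 0 hg
        have hpg : PySem.List.pyGetD dp (j - 1) 0 = endings.getD s[k] 0 := by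
          rw [PySem.List.pyGetD_eq_getElem dp 0 (by omega) (by rw [hlen]; push_cast; omega),
              ← List.getD_eq_getElem dp 0 (by rw [hlen]; omega), hjv]
        simp only [hcon, if_true, h1, PySem.List.pyGetD_natCast, hget, hgd, hpg, hsetc]
        have hv : (1 + endings.values.sum) * 2 - endings.getD s[k] 0
            = 2 * (1 + endings.values.sum) - endings.getD s[k] 0 := by ring
        rw [hv]
    rw [hstep]
    have hcast : (k : Int) + 1 + 1 = ((k + 1 : Nat) : Int) + 1 := by push_cast; ring
    rw [hcast]
    show _ = 1 + ((s.drop (k+1)).foldl solveStepB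
        (endings.insert s[k] (1 + endings.values.sum))).values.sum
    apply ih (k + 1) _ _ _ (by omega) (by omega)
    refine ⟨by simp [hlen], ?_, ?_, ?_, ?_⟩
    · have hlt : k + 1 < dp.length := by omega
      have hset : (dp.set (k + 1)
          (2 * (1 + endings.values.sum) - endings.getD s[k] 0)).getD (k + 1) 0
          = 2 * (1 + endings.values.sum) - endings.getD s[k] 0 := by
        rw [List.getD, List.getElem?_set_self', List.getElem?_eq_getElem hlt]; rfl
      rw [hset, sumValues_insert endings hnd s[k] (1 + endings.values.sum)]
      ring
    · exact PySem.Dict.nodup_keys_insert endings _ _ hnd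
    · intro c' hg'
      by_cases hcc : c' = s[k]
      · subst hcc; rw [PySem.Dict.get?_insert_self] at hg'; cases hg'
      · rw [PySem.Dict.get?_insert_of_ne _ _ hcc] at hg'
        rw [PySem.Dict.getD_insert_of_ne _ _ _ hcc]
        exact hnone _ hg'
    · intro c' j hg'
      by_cases hcc : c' = s[k]
      · subst hcc
        rw [PySem.Dict.get?_insert_self] at hg'
        cases hg'
        refine ⟨by omega, by push_cast; omega, ?_⟩
        have he : ((k : Int) + 1 - 1).toNat = k := by omega
        rw [he, PySem.Dict.getD_insert_self, ← hget, List.getD, List.getD,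
            List.getElem?_set_ne (by omega)]
      · rw [PySem.Dict.get?_insert_of_ne _ _ hcc] at hg'
        obtain ⟨hj1, hjk, hjv⟩ := hsome _ _ hg'
        refine ⟨hj1, by push_cast; omega, ?_⟩
        rw [PySem.Dict.getD_insert_of_ne _ _ _ hcc, ← hjv, List.getD, List.getD,
            List.getElem?_set_ne (by omega)]

theorem empty_values_sum : (PySem.Dict.empty : PySem.Dict Char Int).values.sum = 0 := rfl

theorem empty_keys_nodup : (PySem.Dict.empty : PySem.Dict Char Int).keys.Nodup := by decide

-- ===== VERDICT (by name: the statement is the Claim_ definition above) =====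
theorem solve_spec : Claim_equal_solve := by
  intro string _
  simp only [Spec_solve, solve, solve_alt]
  have h0 : (PySem.List.pyRange 1 ((string.toList.length : Int) + 1) 1)
      = PySem.List.pyRange (((0 : Nat) : Int) + 1) ((string.toList.length : Int) + 1) 1 := by
    norm_num
  rw [h0]
  have := loop_sim string.toList (string.toList.length) 0
    ((List.replicate (string.toList.length + 1) (0 : Int)).set 0 1)
    PySem.Dict.empty PySem.Dict.empty (by omega) (by omega)
    ⟨by simp, by rw [empty_values_sum]; simp [List.replicate_succ], empty_keys_nodup,
     by intro c h; simp [PySem.Dict.getD_empty],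
     by intro c j h; simp [PySem.Dict.get?_empty] at h⟩
  simpa using this
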